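-- pv_equiv track=rewrite | github.com/matt-r-bush/cp8318-project | vqa-abstract-scenes/AS_data_prep.py | create_question_vocab
-- ===== SOURCE A (Python) =====
-- def create_question_vocab(data):
--     max_len = 0
--     tokens = []
--     for example in data:
--         current_len = 0
--         for j, token in enumerate(example['q_tokens']):
--             current_len = j+1
--             tokens.append(token)
--         if current_len > max_len:
--             max_len = current_len
--
--     vocab = {}
--     index = 1 # start indexing from 1 because of padding token
--     vocab['placeholder'] = 0  # add a padding token
--     for token in tokens:
--         if token not in vocab:
--             vocab[token] = index
--             index += 1
--
--     inverse_vocab = {index: token for token, index in vocab.items()}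
--
--     return vocab, inverse_vocab, max_len
-- ===== SOURCE B (Python) =====
-- def create_question_vocab(data):
--     # Single fused pass: vocab and max question length built while walking data once.
--     vocab = {'placeholder': 0}
--     max_len = 0
--     for example in data:
--         n = 0
--         for token in example['q_tokens']:
--             n += 1
--             if token not in vocab:
--                 vocab[token] = len(vocab)
--         max_len = max(max_len, n)
--     inverse_vocab = {index: token for token, index in vocab.items()}
--     return vocab, inverse_vocab, max_len
-- ===== Notes on version B (the rewrite author's own statement) =====
-- stated objective: simpler
-- what changed: Fuses A's two passes (collect all tokens into an intermediate list, then deduplicate with an explicit index counter) into one pass over data that inserts unseen tokens with index len(vocab) and counts tokens inline; no intermediate token list.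
import Mathlib
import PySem

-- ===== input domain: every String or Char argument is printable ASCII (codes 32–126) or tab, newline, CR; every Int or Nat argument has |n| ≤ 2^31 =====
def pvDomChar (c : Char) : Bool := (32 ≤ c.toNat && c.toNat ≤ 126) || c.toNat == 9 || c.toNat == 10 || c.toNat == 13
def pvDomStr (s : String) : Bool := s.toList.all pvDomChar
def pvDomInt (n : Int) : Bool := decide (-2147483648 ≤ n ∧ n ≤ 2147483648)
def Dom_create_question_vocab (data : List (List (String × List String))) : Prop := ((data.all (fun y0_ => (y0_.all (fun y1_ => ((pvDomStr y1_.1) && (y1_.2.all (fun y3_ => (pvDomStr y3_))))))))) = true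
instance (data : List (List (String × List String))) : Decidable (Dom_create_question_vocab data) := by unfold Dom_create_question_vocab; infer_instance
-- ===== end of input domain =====

-- B fuses A's collect-then-deduplicate two-pass structure into a single pass over data,
-- indexing new tokens by the current vocab size instead of a separate counter (objective: simpler).


-- ===== PORT A =====
-- example['q_tokens']: first-match association-list lookup; Pre_ guarantees the key is present,
-- so the [] default is never used on admitted inputs.
def pvGetQ (ex : List (String × List String)) : List String :=
  ((ex.find? (fun p => p.1 == "q_tokens")).map (·.2)).getD []

def create_question_vocab (data : List (List (String × List String))) : (List (String × Int)) × (List (Int × String)) × Int :=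
  -- first loop: max_len and the flat token list
  let s1 := data.foldl (fun (acc : Int × List String) ex =>
      let inner := (PySem.List.enumerate (pvGetQ ex)).foldl
        (fun (st : Int × List String) jt => (jt.1 + 1, st.2 ++ [jt.2])) (0, acc.2)
      (if inner.1 > acc.1 then inner.1 else acc.1, inner.2)) (0, [])
  -- second loop: vocab with explicit index counter starting at 1
  let s2 := s1.2.foldl (fun (st : PySem.Dict String Int × Int) token =>
      if st.1.contains token then st else (st.1.insert token st.2, st.2 + 1))
      ((PySem.Dict.empty).insert "placeholder" 0, 1)
  let inverse := s2.1.items.foldl (fun (d : PySem.Dict Int String) p => d.insert p.2 p.1) PySem.Dict.empty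
  (s2.1.items, inverse.items, s1.1)

-- ===== PORT B =====
def create_question_vocab_alt (data : List (List (String × List String))) : (List (String × Int)) × (List (Int × String)) × Int :=
  let st := data.foldl (fun (st : PySem.Dict String Int × Int) ex =>
      let inner := (pvGetQ ex).foldl
        (fun (p : Int × PySem.Dict String Int) token =>
          (p.1 + 1, if p.2.contains token then p.2 else p.2.insert token (p.2.size : Int)))
        (0, st.1)
      (inner.2, max st.2 inner.1))
    ((PySem.Dict.empty).insert "placeholder" 0, 0)
  let inverse := st.1.items.foldl (fun (d : PySem.Dict Int String) p => d.insert p.2 p.1) PySem.Dict.empty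
  (st.1.items, inverse.items, st.2)

-- ===== PRECONDITION & SPEC =====
-- Pre_ excludes exactly the inputs where some ex lacks the 'q_tokens' key, on which A raises KeyError.
def Pre_create_question_vocab (data : List (List (String × List String))) : Prop :=
  (data.all (fun e => e.any (fun p => p.1 == "q_tokens"))) = true
instance (data : List (List (String × List String))) : Decidable (Pre_create_question_vocab data) := by unfold Pre_create_question_vocab; infer_instance
def pvWitness_create_question_vocab : (List (List (String × List String))) :=
  [[("q_tokens", ["what", "is", "this"])], [("q_tokens", ["is"])]]

def Spec_create_question_vocab (data : List (List (String × List String))) (out : (List (String × Int)) × (List (Int × String)) × Int) : Prop := out = create_question_vocab_alt data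
instance (data : List (List (String × List String))) (out : (List (String × Int)) × (List (Int × String)) × Int) : Decidable (Spec_create_question_vocab data out) := by unfold Spec_create_question_vocab; infer_instance

-- ===== CLAIM (what is proved, stated in full; the proofs are below) =====
def Claim_equal_create_question_vocab : Prop := ∀ (data : List (List (String × List String))), Dom_create_question_vocab data → Pre_create_question_vocab data → Spec_create_question_vocab data (create_question_vocab data)

-- ===== LEMMAS AND PROOFS =====

-- the shared vocab-building step, expressed on the dict alone (B's form)
def pvStepB (d : PySem.Dict String Int) (t : String) : PySem.Dict String Int :=
  if d.contains t then d else d.insert t (d.size : Int)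

-- A's inner enumerate loop: final counter is the token count, tokens get appended
theorem enumA (qt : List String) : ∀ (s : Int) (toks : List String),
    (PySem.List.enumerate qt s).foldl
      (fun (st : Int × List String) jt => (jt.1 + 1, st.2 ++ [jt.2])) (s, toks)
    = (s + qt.length, toks ++ qt) := by
  induction qt with
  | nil => intro s toks; simp [PySem.List.enumerate_nil]
  | cons x xs ih =>
      intro s toks
      simp only [PySem.List.enumerate_cons, List.foldl_cons, ih (s+1) (toks ++ [x]),
        List.length_cons, List.append_assoc, List.singleton_append]
      congr 1
      push_cast; ring

-- A's first loop computes (max of lengths, concatenation of the q_tokens lists)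
theorem loop1A (data : List (List (String × List String))) : ∀ (m : Int) (toks : List String),
    data.foldl (fun (acc : Int × List String) ex =>
      let inner := (PySem.List.enumerate (pvGetQ ex)).foldl
        (fun (st : Int × List String) jt => (jt.1 + 1, st.2 ++ [jt.2])) (0, acc.2)
      (if inner.1 > acc.1 then inner.1 else acc.1, inner.2)) (m, toks)
    = (data.foldl (fun m e => max m ((pvGetQ e).length : Int)) m,
       toks ++ data.flatMap pvGetQ) := by
  induction data with
  | nil => intro m toks; simp
  | cons e rest ih =>
      intro m toks
      simp only [List.foldl_cons, enumA (pvGetQ e) 0 toks, zero_add]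
      rw [ih]
      have : (if ((pvGetQ e).length : Int) > m then ((pvGetQ e).length : Int) else m)
           = max m ((pvGetQ e).length : Int) := by
        split_ifs with h <;> omega
      rw [this]
      simp

-- A's vocab loop with its index counter equals the counter-free fold when index = size
theorem loop2A (l : List String) : ∀ (d : PySem.Dict String Int),
    l.foldl (fun (st : PySem.Dict String Int × Int) token =>
      if st.1.contains token then st else (st.1.insert token st.2, st.2 + 1))
      (d, (d.size : Int))
    = (l.foldl pvStepB d, ((l.foldl pvStepB d).size : Int)) := by
  induction l with
  | nil => intro d; simp
  | cons t rest ih =>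
      intro d
      simp only [List.foldl_cons, pvStepB]
      by_cases h : d.contains t = true
      · simp [h, ih]
      · simp only [Bool.not_eq_true] at h
        have hs : ((d.insert t (d.size : Int)).size : Int) = (d.size : Int) + 1 := by
          simp [PySem.Dict.size_insert, h]
        simp [h, ← hs, ih]

-- B's inner loop: counter and dict evolve independently
theorem innerB (qt : List String) : ∀ (c : Int) (d : PySem.Dict String Int),
    qt.foldl (fun (p : Int × PySem.Dict String Int) token =>
        (p.1 + 1, if p.2.contains token then p.2 else p.2.insert token (p.2.size : Int)))
      (c, d)
    = (c + qt.length, qt.foldl pvStepB d) := by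
  induction qt with
  | nil => intro c d; simp
  | cons t rest ih =>
      intro c d
      simp only [List.foldl_cons, ih, pvStepB, List.length_cons]
      congr 1
      push_cast; ring

-- B's outer loop splits into the same two independent folds A performs
theorem outerB (data : List (List (String × List String))) : ∀ (d : PySem.Dict String Int) (m : Int),
    data.foldl (fun (st : PySem.Dict String Int × Int) ex =>
      let inner := (pvGetQ ex).foldl
        (fun (p : Int × PySem.Dict String Int) token =>
          (p.1 + 1, if p.2.contains token then p.2 else p.2.insert token (p.2.size : Int)))
        (0, st.1)
      (inner.2, max st.2 inner.1)) (d, m)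
    = ((data.flatMap pvGetQ).foldl pvStepB d,
       data.foldl (fun m e => max m ((pvGetQ e).length : Int)) m) := by
  induction data with
  | nil => intro d m; simp
  | cons e rest ih =>
      intro d m
      simp only [List.foldl_cons, innerB (pvGetQ e) 0 d, zero_add, List.flatMap_cons,
        List.foldl_append, ih]

-- ===== VERDICT (by name: the statement is the Claim_ definition above) =====
theorem create_question_vocab_spec : Claim_equal_create_question_vocab := by
  intro data _ _
  show create_question_vocab data = create_question_vocab_alt data
  unfold create_question_vocab create_question_vocab_alt
  rw [loop1A data 0 [], outerB data ((PySem.Dict.empty).insert "placeholder" 0) 0]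
  have h2 := loop2A (List.flatMap pvGetQ data) ((PySem.Dict.empty : PySem.Dict String Int).insert "placeholder" 0)
  have h0 : (((PySem.Dict.empty : PySem.Dict String Int).insert "placeholder" 0).size : Int) = 1 := by decide
  rw [h0] at h2
  simp only [List.nil_append, h2]
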